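-- pv_equiv track=rewrite | github.com/chaynes2019/AvidaGeneDupe | experiments/2022-3-29-PaperDuplication/AssociatedScripts/find_best_alignment.py | score_alignments
-- ===== SOURCE A (Python) =====
-- import typing
--
-- def make_ansatz(s: str, n: int, i: int) -> typing.Optional[str]:
--     if not 0 <= i + n <= len(s):
--         return None
--     else:
--         return s[: i + n] + s[i:]
--
-- def score_alignments(first: str, second: str) -> typing.Iterable[int]:
--     n = len(second) - len(first)
--     for i in range(len(first)):
--         ansatz = make_ansatz(first, n, i)
--         if ansatz is not None:
--             indices = [*range(len(first))]
--             yield (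
--                 sum(a == b for a, b in zip(ansatz, second)),  # score
--                 make_ansatz(indices, n, i),  # alignment
--             )
-- ===== SOURCE B (Python) =====
-- def score_alignments(first, second):
--     L = len(first)
--     S = len(second)
--     n = S - L
--     # P[k] = number of j < k with first[j] == second[j]
--     P = [0]
--     for k in range(min(L, S)):
--         P.append(P[k] + (first[k] == second[k]))
--     # Q[m] = number of j < m (with j + n >= 0) such that first[j] == second[j + n]
--     Q = [0]
--     for m in range(L):
--         Q.append(Q[m] + (m + n >= 0 and first[m] == second[m + n]))
--     for i in range(L):
--         if 0 <= i + n <= L: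
--             yield (P[i + n] + Q[L] - Q[i], list(range(i + n)) + list(range(i, L)))
-- ===== Notes on version B (the rewrite author's own statement) =====
-- stated objective: faster
-- what changed: Instead of rebuilding the ansatz string and rescanning the whole zip for every offset i, B precomputes two prefix-count tables (straight matches P and diagonal matches Q) once and reads each score as P[i+n] + Q[L] - Q[i].
import Mathlib
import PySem

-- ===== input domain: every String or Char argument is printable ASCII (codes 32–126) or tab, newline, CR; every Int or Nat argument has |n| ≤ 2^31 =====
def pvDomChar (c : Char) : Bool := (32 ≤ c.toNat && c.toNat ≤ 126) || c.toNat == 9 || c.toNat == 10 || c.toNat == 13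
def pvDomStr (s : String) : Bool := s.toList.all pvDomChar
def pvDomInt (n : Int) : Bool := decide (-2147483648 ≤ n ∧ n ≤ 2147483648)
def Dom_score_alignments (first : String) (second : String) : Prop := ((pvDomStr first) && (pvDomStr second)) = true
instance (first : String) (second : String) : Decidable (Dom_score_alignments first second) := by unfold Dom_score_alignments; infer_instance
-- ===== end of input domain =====

-- B replaces A's per-offset zip rescan of the whole string by two prefix-count tables
-- built once (objective: faster by a constant/asymptotic factor on the score part).

-- ===== PORT A =====
-- make_ansatz on a string (port of make_ansatz specialised to str)
def pvMakeAnsatzStr (s : List Char) (n i : Int) : Option (List Char) :=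
  if ¬ (0 ≤ i + n ∧ i + n ≤ (s.length : Int)) then none
  else some (PySem.List.slice s none (some (i + n)) ++ PySem.List.slice s (some i) none)

-- make_ansatz on the indices list (port of make_ansatz specialised to list[int])
def pvMakeAnsatzIdx (s : List Int) (n i : Int) : Option (List Int) :=
  if ¬ (0 ≤ i + n ∧ i + n ≤ (s.length : Int)) then none
  else some (PySem.List.slice s none (some (i + n)) ++ PySem.List.slice s (some i) none)

def score_alignments (first : String) (second : String) : List (Int × Option (List Int)) :=
  let f := first.toList
  let sc := second.toList
  let n : Int := (sc.length : Int) - (f.length : Int)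
  (PySem.List.pyRange 0 (f.length : Int) 1).foldl (fun acc i =>
    match pvMakeAnsatzStr f n i with
    | none => acc
    | some ansatz =>
      let indices := PySem.List.pyRange 0 (f.length : Int) 1
      acc ++ [( ((ansatz.zip sc).map (fun p => if p.1 = p.2 then (1 : Int) else 0)).sum,
                pvMakeAnsatzIdx indices n i )]) []

-- ===== PORT B =====
def score_alignments_alt (first : String) (second : String) : List (Int × Option (List Int)) :=
  let f := first.toList
  let s := second.toList
  let L := f.length
  let S := s.length
  let n : Int := (S : Int) - (L : Int)
  -- P[k] = number of j < k with first[j] == second[j]; indices k < min L S are in range of both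
  let P : List Int := (List.range (min L S)).foldl
    (fun (P : List Int) (k : Nat) => P ++ [PySem.List.pyGetD P (k : Int) 0 + (if f[k]? = s[k]? then (1 : Int) else 0)]) [0]
  -- Q[m] = number of j < m (with j+n >= 0) such that first[j] == second[j+n]
  let Q : List Int := (List.range L).foldl
    (fun (Q : List Int) (m : Nat) => Q ++ [PySem.List.pyGetD Q (m : Int) 0 +
      (if 0 ≤ (m : Int) + n then (if f[m]? = s[((m : Int) + n).toNat]? then (1 : Int) else 0) else 0)]) [0]
  (PySem.List.pyRange 0 (L : Int) 1).foldl (fun acc i =>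
    if 0 ≤ i + n ∧ i + n ≤ (L : Int) then
      acc ++ [( PySem.List.pyGetD P (i + n) 0 + PySem.List.pyGetD Q (L : Int) 0 - PySem.List.pyGetD Q i 0,
                some (PySem.List.pyRange 0 (i + n) 1 ++ PySem.List.pyRange i (L : Int) 1) )]
    else acc) []

-- ===== PRECONDITION & SPEC =====
def Spec_score_alignments (first : String) (second : String) (out : List (Int × Option (List Int))) : Prop := out = score_alignments_alt first second
instance (first : String) (second : String) (out : List (Int × Option (List Int))) : Decidable (Spec_score_alignments first second out) := by unfold Spec_score_alignments; infer_instance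

-- ===== CLAIM (what is proved, stated in full; the proofs are below) =====
def Claim_equal_score_alignments : Prop := ∀ (first : String) (second : String), Dom_score_alignments first second → Spec_score_alignments first second (score_alignments first second)

-- ===== LEMMAS AND PROOFS =====

def pvMC : List Char → List Char → Int
  | a :: as, b :: bs => (if a = b then (1:Int) else 0) + pvMC as bs
  | _, _ => 0

theorem pvZipSum (u v : List Char) :
    ((u.zip v).map (fun p => if p.1 = p.2 then (1:Int) else 0)).sum = pvMC u v := by
  induction u generalizing v with
  | nil => simp [pvMC]
  | cons a as ih =>
    cases v with
    | nil => simp [pvMC]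
    | cons b bs => simp [pvMC, ih]

theorem pvMC_eq_sum (u v : List Char) :
    pvMC u v = ((List.range (min u.length v.length)).map
      (fun j => if u[j]? = v[j]? then (1:Int) else 0)).sum := by
  induction u generalizing v with
  | nil => simp [pvMC]
  | cons a as ih =>
    cases v with
    | nil => simp [pvMC]
    | cons b bs =>
      rw [pvMC, ih bs]
      have h1 : min (a :: as).length (b :: bs).length = min as.length bs.length + 1 := by
        simp [Nat.succ_min_succ]
      rw [h1, List.range_succ_eq_map, List.map_cons, List.map_map, List.sum_cons]
      have h2 : ∀ j ∈ List.range (min as.length bs.length),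
          (if as[j]? = bs[j]? then (1:Int) else 0)
            = ((fun j => if (a :: as)[j]? = (b :: bs)[j]? then (1:Int) else 0) ∘ Nat.succ) j := by
        intro j _; simp
      rw [List.map_congr_left h2]
      simp

theorem pvMC_append (x y v : List Char) (h : x.length ≤ v.length) :
    pvMC (x ++ y) v = pvMC x v + pvMC y (v.drop x.length) := by
  induction x generalizing v with
  | nil => simp [pvMC]
  | cons a as ih =>
    cases v with
    | nil => simp at h
    | cons b bs =>
      simp only [List.cons_append, pvMC, List.length_cons, List.drop_succ_cons]
      rw [ih bs (by simpa using h)]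
      ring

theorem pvBuild (g : Nat → Int) (m : Nat) :
    (List.range m).foldl
      (fun (P : List Int) (k : Nat) => P ++ [PySem.List.pyGetD P (k : Int) 0 + g k]) [0]
    = (List.range (m+1)).map (fun k => ((List.range k).map g).sum) := by
  induction m with
  | zero => simp
  | succ m ih =>
    rw [List.range_succ, List.foldl_append, ih]
    simp only [List.foldl_cons, List.foldl_nil]
    rw [PySem.List.pyGetD_natCast, PySem.List.getD_map_range _ _ _ _ (by omega)]
    rw [List.range_succ (n := m+1), List.map_append]
    simp [List.range_succ]

theorem pvSumSub (g : Nat → Int) (i L : Nat) (h : i ≤ L) :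
    ((List.range L).map g).sum - ((List.range i).map g).sum
      = ((List.range (L - i)).map (fun u => g (i + u))).sum := by
  obtain ⟨d, rfl⟩ : ∃ d, L = i + d := ⟨L - i, by omega⟩
  simp [List.range_add, List.map_map, Function.comp_def]

theorem pvMain (first second : String) :
    score_alignments first second = score_alignments_alt first second := by
  unfold score_alignments score_alignments_alt
  simp only []
  set f := first.toList with hf
  set s := second.toList with hs
  set L := f.length with hL
  set S := s.length with hS
  set n : Int := (S : Int) - (L : Int) with hn
  rw [pvBuild, pvBuild]
  apply PySem.List.foldl_congr_mem
  intro acc x hx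
  rw [PySem.List.mem_pyRange_one] at hx
  unfold pvMakeAnsatzStr
  by_cases h : 0 ≤ x + n ∧ x + n ≤ (L : Int)
  · obtain ⟨h0, h1⟩ := h
    obtain ⟨hx0, hxL⟩ := hx
    rw [if_neg (by rw [← hL]; omega)]
    rw [if_pos ⟨h0, h1⟩]
    set t := (x + n).toNat with hts
    have ht : (t : Int) = x + n := Int.toNat_of_nonneg h0
    set i' := x.toNat with his
    have hi' : (i' : Int) = x := Int.toNat_of_nonneg hx0
    have hiL : i' < L := by omega
    have htL : t ≤ L := by omega
    have htS : t < S := by omega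
    rw [PySem.List.slice_to f h0, PySem.List.slice_from f hx0]
    dsimp only
    rw [pvZipSum]
    have hlt : (f.take (x + n).toNat).length = t := by
      simp [List.length_take]; omega
    rw [pvMC_append _ _ _ (by rw [hlt, ← hS]; omega), hlt]
    congr 2
    refine Prod.ext ?_ ?_
    · -- scores
      rw [PySem.List.pyGetD_of_nonneg _ _ h0, PySem.List.pyGetD_natCast,
        PySem.List.pyGetD_of_nonneg _ _ hx0]
      rw [PySem.List.getD_map_range _ _ _ _ (show (x + n).toNat < min L S + 1 by omega)]
      rw [PySem.List.getD_map_range _ _ _ _ (show L < L + 1 by omega)]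
      rw [PySem.List.getD_map_range _ _ _ _ (show x.toNat < L + 1 by omega)]
      have haveP : pvMC (List.take (x + n).toNat f) s
          = (List.map (fun k => if f[k]? = s[k]? then (1:Int) else 0) (List.range t)).sum := by
        rw [pvMC_eq_sum]
        rw [hlt, ← hS, Nat.min_eq_left (by omega)]
        refine congrArg List.sum (List.map_congr_left fun j hj => ?_)
        rw [List.mem_range] at hj
        rw [List.getElem?_take, if_pos (show j < (x + n).toNat by omega)]
      have haveQ : pvMC (List.drop x.toNat f) (List.drop t s)
          = (List.map (fun (m : Nat) => if 0 ≤ (m : Int) + n then if f[m]? = s[((m : Int) + n).toNat]? then (1:Int) else 0 else 0) (List.range L)).sum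
            - (List.map (fun (m : Nat) => if 0 ≤ (m : Int) + n then if f[m]? = s[((m : Int) + n).toNat]? then (1:Int) else 0 else 0) (List.range i')).sum := by
        rw [pvMC_eq_sum, pvSumSub _ i' L (le_of_lt hiL)]
        have hm : min (List.drop x.toNat f).length (List.drop t s).length = L - i' := by
          simp only [List.length_drop, ← hL, ← hS]
          omega
        rw [hm]
        refine congrArg List.sum (List.map_congr_left fun u hu => ?_)
        rw [List.mem_range] at hu
        rw [List.getElem?_drop, List.getElem?_drop]
        rw [if_pos (show (0:Int) ≤ ↑(i' + u) + n by push_cast; omega)]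
        have hidx : ((↑(i' + u) : Int) + n).toNat = t + u := by push_cast; omega
        rw [hidx]
      rw [haveP, haveQ]
      ring
    · -- alignments
      unfold pvMakeAnsatzIdx
      have hlen : (PySem.List.pyRange 0 (L : Int) 1).length = L := by
        rw [PySem.List.length_pyRange_one]; simp
      rw [if_neg (not_not_intro (show 0 ≤ x + n ∧ x + n ≤ ((PySem.List.pyRange 0 (L : Int) 1).length : Int) by rw [hlen]; exact ⟨h0, h1⟩))]
      have e1 : PySem.List.slice (PySem.List.pyRange 0 (L : Int) 1) none (some (x + n))
          = PySem.List.pyRange 0 (x + n) 1 := by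
        rw [PySem.List.slice_to _ h0, PySem.List.pyRange_one_append 0 (x + n) (L : Int) h0 h1]
        have e1l : (PySem.List.pyRange 0 (x + n) 1).length = (x + n).toNat := by
          rw [PySem.List.length_pyRange_one]; simp
        rw [← e1l, List.take_left]
      have e2 : PySem.List.slice (PySem.List.pyRange 0 (L : Int) 1) (some x) none
          = PySem.List.pyRange x (L : Int) 1 := by
        rw [PySem.List.slice_from _ hx0, PySem.List.pyRange_one_append 0 x (L : Int) hx0 (le_of_lt hxL)]
        have e2l : (PySem.List.pyRange 0 x 1).length = x.toNat := by
          rw [PySem.List.length_pyRange_one]; simp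
        rw [← e2l, List.drop_left]
      rw [e1, e2]
  · rw [if_pos (show ¬(0 ≤ x + n ∧ x + n ≤ (↑f.length : Int)) by rw [← hL]; exact h),
      if_neg h]

-- ===== VERDICT (by name: the statement is the Claim_ definition above) =====
theorem score_alignments_spec : Claim_equal_score_alignments := by
  intro first second _
  unfold Spec_score_alignments
  exact pvMain first second
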